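-- pv_equiv track=rewrite | github.com/BekkerBarnabasCkik/Python | Beolvasas/ajto.py | bentLevokSzama
-- ===== SOURCE A (Python) =====
-- def bentLevokSzama(t):
--     db=0
--     for _,_,_,irany in t:
--         if irany=="be":
--             db+=1
--         else:
--             db-=1
--     return db
-- ===== SOURCE B (Python) =====
-- def bentLevokSzama(t):
--     freq = {}
--     for _, _, _, irany in t:
--         freq[irany] = freq.get(irany, 0) + 1
--     total = 0
--     for k, c in freq.items():
--         total += c if k == "be" else -c
--     return total
-- ===== Notes on version B (the rewrite author's own statement) =====
-- stated objective: alternative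
-- what changed: Instead of a running +1/-1 balance over the entries, B first builds a frequency dictionary of the direction strings and then sums signed counts over the distinct directions (a hash-index/grouping pass followed by an aggregation over keys).
import Mathlib
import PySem

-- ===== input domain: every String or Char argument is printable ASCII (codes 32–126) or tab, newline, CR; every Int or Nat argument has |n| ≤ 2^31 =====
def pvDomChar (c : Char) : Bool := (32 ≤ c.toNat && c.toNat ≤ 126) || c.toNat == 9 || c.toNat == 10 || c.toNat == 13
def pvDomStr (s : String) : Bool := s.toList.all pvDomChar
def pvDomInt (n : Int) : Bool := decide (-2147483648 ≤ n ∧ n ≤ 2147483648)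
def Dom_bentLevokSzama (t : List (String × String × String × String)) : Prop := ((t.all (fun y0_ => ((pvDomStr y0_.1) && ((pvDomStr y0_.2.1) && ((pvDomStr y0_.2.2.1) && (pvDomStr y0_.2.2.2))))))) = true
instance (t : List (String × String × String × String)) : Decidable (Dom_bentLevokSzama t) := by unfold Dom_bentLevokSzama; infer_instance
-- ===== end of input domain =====

-- B groups the entries into a frequency dict of direction strings and sums signed counts over distinct keys; objective: alternative decomposition (grouping + aggregation instead of a running balance).


-- ===== PORT A =====
-- A's loop: a running +1/-1 balance over the entries
def bentLevokSzama (t : List (String × String × String × String)) : Int :=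
  t.foldl (fun db r => if r.2.2.2 = "be" then db + 1 else db - 1) 0

-- ===== PORT B =====
-- B: build a frequency dict of direction strings, then sum signed counts over its items
def bentLevokSzama_alt (t : List (String × String × String × String)) : Int :=
  let freq : PySem.Dict String Int :=
    t.foldl (fun d r => d.insert r.2.2.2 (d.getD r.2.2.2 0 + 1)) PySem.Dict.empty
  freq.items.foldl (fun total kc => total + (if kc.1 = "be" then kc.2 else -kc.2)) 0

-- ===== PRECONDITION & SPEC =====
def Spec_bentLevokSzama (t : List (String × String × String × String)) (out : Int) : Prop := out = bentLevokSzama_alt t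
instance (t : List (String × String × String × String)) (out : Int) : Decidable (Spec_bentLevokSzama t out) := by unfold Spec_bentLevokSzama; infer_instance

-- ===== CLAIM (what is proved, stated in full; the proofs are below) =====
def Claim_equal_bentLevokSzama : Prop := ∀ (t : List (String × String × String × String)), Dom_bentLevokSzama t → Spec_bentLevokSzama t (bentLevokSzama t)

-- ===== LEMMAS AND PROOFS =====

-- A's fold in closed form over the list of direction strings
theorem bentLevokSzama_fold_eq (t : List (String × String × String × String)) (init : Int) :
    t.foldl (fun db r => if r.2.2.2 = "be" then db + 1 else db - 1) init
      = init + 2 * (((t.map (·.2.2.2)).count "be" : Int)) - (t.length : Int) := by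
  induction t generalizing init with
  | nil => simp
  | cons h tl ih =>
    simp only [List.foldl_cons, List.map_cons, List.count_cons, List.length_cons]
    by_cases hb : h.2.2.2 = "be" <;> simp [hb, ih] <;> ring

-- a foldl accumulating sums is the sum of the mapped list
theorem foldl_add_map_sum {α : Type} (f : α → Int) (l : List α) (init : Int) :
    l.foldl (fun total x => total + f x) init = init + (l.map f).sum := by
  induction l generalizing init with
  | nil => simp
  | cons h tl ih => simp [ih]; ring

-- over a Nodup list containing d, an indicator sum picks out g d
theorem sum_map_indicator (ks : List String) (hk : ks.Nodup) (d : String) (hd : d ∈ ks)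
    (g : String → Int) :
    (ks.map (fun k => if k = d then g k else 0)).sum = g d := by
  induction ks with
  | nil => cases hd
  | cons k ks' ih =>
    rcases List.nodup_cons.mp hk with ⟨hk1, hk2⟩
    by_cases hkd : k = d
    · have hz : (ks'.map (fun x => if x = d then g x else 0)).sum = 0 := by
        apply List.sum_eq_zero
        intro x hx
        rcases List.mem_map.mp hx with ⟨y, hy, rfl⟩
        have hyd : y ≠ d := fun h => hk1 (by rw [hkd, ← h]; exact hy)
        simp [hyd]
      simp [hkd, hz]
    · have hd' : d ∈ ks' := by
        rcases List.mem_cons.mp hd with h | h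
        · exact absurd h.symm hkd
        · exact h
      simp [hkd, ih hk2 hd']

-- signed-count sum over any Nodup key list covering dirs, in closed form
theorem signed_sum_eq (ks : List String) (hk : ks.Nodup) (dirs : List String)
    (hsub : ∀ d ∈ dirs, d ∈ ks) :
    (ks.map (fun k => if k = "be" then (dirs.count k : Int) else -(dirs.count k : Int))).sum
      = 2 * (dirs.count "be" : Int) - (dirs.length : Int) := by
  induction dirs with
  | nil => simp
  | cons d rest ih =>
    have hsub' : ∀ x ∈ rest, x ∈ ks := fun x hx => hsub x (List.mem_cons_of_mem _ hx)
    have hdk : d ∈ ks := hsub d (List.mem_cons_self)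
    have hsplit :
        (ks.map (fun k => if k = "be" then ((d :: rest).count k : Int) else -(((d :: rest).count k : Int)))).sum
          = (ks.map (fun k => if k = "be" then (rest.count k : Int) else -(rest.count k : Int))).sum
            + (ks.map (fun k => if k = d then (if k = "be" then (1 : Int) else -1) else 0)).sum := by
      rw [← List.sum_map_add]
      apply congrArg
      apply List.map_congr_left
      intro k _
      have hc : (((d :: rest).count k : Int)) = (rest.count k : Int) + (if k = d then 1 else 0) := by
        by_cases h : k = d
        · simp [h]
        · simp [h, Ne.symm h]
      rw [hc]
      split_ifs <;> ring
    have hcb : (((d :: rest).count "be" : Int)) = (rest.count "be" : Int) + (if d = "be" then 1 else 0) := by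
      by_cases h : d = "be"
      · subst h; simp
      · have hne : ("be" == d) = false := beq_eq_false_iff_ne.mpr (fun hh => h hh.symm)
        simp [h]
    rw [hsplit, ih hsub', sum_map_indicator ks hk d hdk]
    rw [List.length_cons]
    push_cast
    rw [hcb]
    split_ifs <;> ring

-- ===== VERDICT (by name: the statement is the Claim_ definition above) =====
theorem bentLevokSzama_spec : Claim_equal_bentLevokSzama := by
  intro t _
  unfold Spec_bentLevokSzama bentLevokSzama bentLevokSzama_alt
  have hfreq :
      t.foldl (fun d r => d.insert r.2.2.2 (d.getD r.2.2.2 0 + 1)) PySem.Dict.empty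
        = PySem.Dict.counter (t.map (·.2.2.2)) := by
    rw [← PySem.Dict.foldl_insert_getD_add_one_eq_counter, List.foldl_map]
  simp only [hfreq, PySem.Dict.items_counter, bentLevokSzama_fold_eq t 0,
    foldl_add_map_sum (fun kc : String × Int => if kc.1 = "be" then kc.2 else -kc.2),
    List.map_map]
  have hmap :
      (PySem.Set.ofList (t.map (·.2.2.2))).map
          ((fun kc : String × Int => if kc.1 = "be" then kc.2 else -kc.2) ∘
            fun k => (k, ((t.map (·.2.2.2)).count k : Int)))
        = (PySem.Set.ofList (t.map (·.2.2.2))).map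
            (fun k => if k = "be" then ((t.map (·.2.2.2)).count k : Int)
                      else -((t.map (·.2.2.2)).count k : Int)) := by
    apply List.map_congr_left
    intro k _
    simp
  rw [hmap, signed_sum_eq (PySem.Set.ofList (t.map (·.2.2.2))) (PySem.Set.nodup_ofList _)
      (t.map (·.2.2.2)) (fun d hd => (PySem.Set.mem_ofList _ _).mpr hd)]
  simp
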